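-- pv_equiv track=rewrite | github.com/Daeell/AlGORITM-STUDY | 1316/mgs.py | isGroup
-- ===== SOURCE A (Python) =====
-- def isGroup(word) :
--     not_series = []
--
--     for _alphabet in word :
--         if not not_series :
--             not_series.append(_alphabet)
--
--         if not_series[-1] != _alphabet :
--             not_series.append(_alphabet)
--
--
--     check_set = set()
--     for alphabet in not_series :
--         if alphabet in check_set :
--             return False
--         else :
--             check_set.add(alphabet)
--
--     return True
-- ===== SOURCE B (Python) =====
-- def isGroup(word):
--     seen = set()
--     prev = object()  # sentinel distinct from any character
--     for ch in word:
--         if ch != prev: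
--             if ch in seen:
--                 return False
--             seen.add(ch)
--             prev = ch
--     return True
-- ===== Notes on version B (the rewrite author's own statement) =====
-- stated objective: simpler
-- what changed: Fuses A's two sequential passes (build a collapsed list, then scan it for duplicates) into a single scan that tracks the previous character and a seen-set, with no intermediate list.
import Mathlib
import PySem

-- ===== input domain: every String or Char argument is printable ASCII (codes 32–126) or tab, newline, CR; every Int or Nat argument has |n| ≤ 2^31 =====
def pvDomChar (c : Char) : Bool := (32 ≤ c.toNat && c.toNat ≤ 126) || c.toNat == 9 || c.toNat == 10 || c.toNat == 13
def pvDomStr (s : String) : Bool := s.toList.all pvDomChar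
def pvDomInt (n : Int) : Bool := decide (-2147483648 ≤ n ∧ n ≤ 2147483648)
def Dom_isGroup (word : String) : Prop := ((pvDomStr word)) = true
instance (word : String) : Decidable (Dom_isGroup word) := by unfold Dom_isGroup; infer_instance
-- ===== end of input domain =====

-- B fuses A's two passes (build collapsed list, then scan for duplicates) into one scan; objective: simpler.

-- ===== PORT A =====
-- first loop of A: builds not_series; not_series[-1] is taken on an always-nonempty list, = getLast?
def isGroupStep (acc : List Char) (c : Char) : List Char :=
  let acc := if acc = [] then acc ++ [c] else acc
  if acc.getLast? ≠ some c then acc ++ [c] else acc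

-- second loop of A: scan not_series with check_set, return False on a repeat
def isGroupCheck : List Char → PySem.Set Char → Bool
  | [], _ => true
  | c :: rest, s => if PySem.Set.contains s c then false else isGroupCheck rest (PySem.Set.add s c)

def isGroup (word : String) : Bool :=
  let not_series := word.toList.foldl isGroupStep []
  isGroupCheck not_series PySem.Set.empty

-- ===== PORT B =====
-- B's single loop: seen-set plus previous character (none = the fresh sentinel)
def isGroupAltLoop : List Char → PySem.Set Char → Option Char → Bool
  | [], _, _ => true
  | c :: rest, seen, prev =>
    if some c ≠ prev then
      if PySem.Set.contains seen c then false
      else isGroupAltLoop rest (PySem.Set.add seen c) (some c)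
    else isGroupAltLoop rest seen prev

def isGroup_alt (word : String) : Bool :=
  isGroupAltLoop word.toList PySem.Set.empty none

-- ===== PRECONDITION & SPEC =====
def Spec_isGroup (word : String) (out : Bool) : Prop := out = isGroup_alt word
instance (word : String) (out : Bool) : Decidable (Spec_isGroup word out) := by unfold Spec_isGroup; infer_instance

-- ===== CLAIM (what is proved, stated in full; the proofs are below) =====
def Claim_equal_isGroup : Prop := ∀ (word : String), Dom_isGroup word → Spec_isGroup word (isGroup word)

-- ===== LEMMAS AND PROOFS =====

-- the collapsed (run-compressed) list of l, given the previous character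
def collapseFrom : Option Char → List Char → List Char
  | _, [] => []
  | prev, c :: rest => if some c = prev then collapseFrom prev rest else c :: collapseFrom (some c) rest

theorem altLoop_eq_check (l : List Char) :
    ∀ (seen : PySem.Set Char) (prev : Option Char),
      isGroupAltLoop l seen prev = isGroupCheck (collapseFrom prev l) seen := by
  induction l with
  | nil => intro seen prev; rfl
  | cons c rest ih =>
    intro seen prev
    by_cases h : some c = prev
    · simp [isGroupAltLoop, collapseFrom, h, ih]
    · simp [isGroupAltLoop, collapseFrom, h, isGroupCheck, ih]

theorem foldl_step_ne_nil (l : List Char) :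
    ∀ (acc : List Char), acc ≠ [] →
      l.foldl isGroupStep acc = acc ++ collapseFrom acc.getLast? l := by
  induction l with
  | nil => intro acc _; simp [collapseFrom]
  | cons c rest ih =>
    intro acc hacc
    by_cases h : acc.getLast? = some c
    · have hstep : isGroupStep acc c = acc := by
        simp [isGroupStep, hacc, h]
      simp [List.foldl_cons, hstep, collapseFrom, h, ih acc hacc]
    · have hstep : isGroupStep acc c = acc ++ [c] := by
        simp [isGroupStep, hacc, h]
      have hlast : (acc ++ [c]).getLast? = some c := by simp
      rw [List.foldl_cons, hstep, ih (acc ++ [c]) (by simp), hlast]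
      simp only [collapseFrom]
      rw [if_neg (fun hh => h hh.symm)]
      simp

theorem foldl_step_nil (l : List Char) :
    l.foldl isGroupStep [] = collapseFrom none l := by
  cases l with
  | nil => rfl
  | cons c rest =>
    have hstep : isGroupStep [] c = [c] := by simp [isGroupStep]
    rw [List.foldl_cons, hstep, foldl_step_ne_nil rest [c] (by simp)]
    simp [collapseFrom]

-- ===== VERDICT (by name: the statement is the Claim_ definition above) =====
theorem isGroup_spec : Claim_equal_isGroup := by
  intro word _
  unfold Spec_isGroup isGroup isGroup_alt
  rw [foldl_step_nil, altLoop_eq_check]
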